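-- pv_equiv track=rewrite | github.com/ZaherM7/Yams | main.py | triple
-- ===== SOURCE A (Python) =====
-- def triple(resultat_lancer):
--     valeur_du_de=0
--     for i in range(5):
--         valeur_du_de_boucle=resultat_lancer[i]
--         compteur=0
--         for j in range(5):
--             if resultat_lancer[j]==valeur_du_de_boucle:
--                 compteur+=1
--         if compteur>=3:
--             valeur_du_de=valeur_du_de_boucle
--             return (True,valeur_du_de)
--             break
--     return(False,valeur_du_de)
-- ===== SOURCE B (Python) =====
-- def triple(resultat_lancer):
--     counts = {}
--     for i in range(5):
--         v = resultat_lancer[i]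
--         counts[v] = counts.get(v, 0) + 1
--     for v, c in counts.items():
--         if c >= 3:
--             return (True, v)
--     return (False, 0)
-- ===== Notes on version B (the rewrite author's own statement) =====
-- stated objective: idiomatic
-- what changed: Replaces the nested 5x5 rescan with a single pass building a frequency table over the first five dice, then one scan of the table for a count >= 3.
import Mathlib
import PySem

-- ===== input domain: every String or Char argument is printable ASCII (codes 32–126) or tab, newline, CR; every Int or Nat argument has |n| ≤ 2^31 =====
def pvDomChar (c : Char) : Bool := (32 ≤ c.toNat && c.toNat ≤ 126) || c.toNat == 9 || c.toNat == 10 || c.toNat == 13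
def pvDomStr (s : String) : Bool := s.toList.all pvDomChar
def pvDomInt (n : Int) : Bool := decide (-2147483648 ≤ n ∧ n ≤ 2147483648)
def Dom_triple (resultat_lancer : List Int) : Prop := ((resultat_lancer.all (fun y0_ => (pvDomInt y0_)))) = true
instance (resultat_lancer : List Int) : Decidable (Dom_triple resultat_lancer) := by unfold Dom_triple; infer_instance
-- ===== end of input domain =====

-- B replaces A's nested 5×5 rescan by one pass that builds a frequency table over the first
-- five dice and then a single scan of the table (more idiomatic; same result).

-- ===== PORT A =====
-- inner loop: compteur = number of j in range(5) with resultat_lancer[j] == valeur_du_de_boucle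
-- (PySem.List.pyGetD … 0 is exact here because Pre_triple puts every index 0..4 in range)
def tripleCount (xs : List Int) (v : Int) : Int :=
  (PySem.List.pyRange 0 5 1).foldl
    (fun compteur j => if PySem.List.pyGetD xs j 0 = v then compteur + 1 else compteur) 0

-- outer loop over the remaining indices; the early `return (True, …)` is the first branch,
-- falling off the loop returns (False, valeur_du_de) with valeur_du_de still 0
def tripleGo (xs : List Int) : List Int → Bool × Int
  | [] => (false, 0)
  | i :: rest =>
    let v := PySem.List.pyGetD xs i 0
    if tripleCount xs v ≥ 3 then (true, v) else tripleGo xs rest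

def triple (resultat_lancer : List Int) : Bool × Int :=
  tripleGo resultat_lancer (PySem.List.pyRange 0 5 1)

-- ===== PORT B =====
-- counts[v] = counts.get(v, 0) + 1 over i in range(5)
def tripleAltCounts (xs : List Int) : PySem.Dict Int Int :=
  (PySem.List.pyRange 0 5 1).foldl
    (fun d i =>
      let v := PySem.List.pyGetD xs i 0
      d.insert v (d.getD v 0 + 1)) PySem.Dict.empty

-- the scan of counts.items() for a count ≥ 3
def tripleAltScan : List (Int × Int) → Bool × Int
  | [] => (false, 0)
  | (v, c) :: rest => if c ≥ 3 then (true, v) else tripleAltScan rest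

def triple_alt (resultat_lancer : List Int) : Bool × Int :=
  tripleAltScan (tripleAltCounts resultat_lancer).items

-- ===== PRECONDITION & SPEC =====
-- Python A raises IndexError when the list has fewer than 5 elements; exactly those inputs are excluded.
def Pre_triple (resultat_lancer : List Int) : Prop := 5 ≤ resultat_lancer.length
instance (resultat_lancer : List Int) : Decidable (Pre_triple resultat_lancer) := by unfold Pre_triple; infer_instance
def pvWitness_triple : List Int := [1, 2, 1, 1, 4]

def Spec_triple (resultat_lancer : List Int) (out : Bool × Int) : Prop := out = triple_alt resultat_lancer
instance (resultat_lancer : List Int) (out : Bool × Int) : Decidable (Spec_triple resultat_lancer out) := by unfold Spec_triple; infer_instance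

-- ===== CLAIM (what is proved, stated in full; the proofs are below) =====
def Claim_equal_triple : Prop := ∀ (resultat_lancer : List Int), Dom_triple resultat_lancer → Pre_triple resultat_lancer → Spec_triple resultat_lancer (triple resultat_lancer)

-- ===== LEMMAS AND PROOFS =====

-- the five dice values both programs read, and the "has a triple" test, as proof-side names
def tripleVals (xs : List Int) : List Int :=
  [PySem.List.pyGetD xs 0 0, PySem.List.pyGetD xs 1 0, PySem.List.pyGetD xs 2 0,
   PySem.List.pyGetD xs 3 0, PySem.List.pyGetD xs 4 0]

def tripleP (xs : List Int) (v : Int) : Bool := decide (tripleCount xs v ≥ 3)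

theorem hr5 : PySem.List.pyRange 0 5 1 = [0, 1, 2, 3, 4] := by decide

-- A's inner loop counts occurrences among the five values
theorem count_eq (xs : List Int) (v : Int) :
    tripleCount xs v = ((tripleVals xs).count v : Int) := by
  simp [tripleCount, tripleVals, hr5, List.count_cons]
  split_ifs <;> simp_all

-- A = the first value among the five whose count is ≥ 3
theorem go_eq_find (xs : List Int) :
    triple xs =
      (match (tripleVals xs).find? (tripleP xs) with
        | some v => (true, v)
        | none => (false, 0)) := by
  simp only [triple, hr5, tripleGo, tripleVals, tripleP, List.find?]
  split_ifs with h0 h1 h2 h3 h4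
  · rw [decide_eq_true h0]
  · rw [decide_eq_false (by omega), decide_eq_true h1]
  · rw [decide_eq_false (by omega), decide_eq_false (by omega), decide_eq_true h2]
  · rw [decide_eq_false (by omega), decide_eq_false (by omega), decide_eq_false (by omega),
      decide_eq_true h3]
  · rw [decide_eq_false (by omega), decide_eq_false (by omega), decide_eq_false (by omega),
      decide_eq_false (by omega), decide_eq_true h4]
  · rw [decide_eq_false (by omega), decide_eq_false (by omega), decide_eq_false (by omega),
      decide_eq_false (by omega), decide_eq_false (by omega)]

-- B's table is Counter of the five values
theorem counts_eq (xs : List Int) :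
    tripleAltCounts xs = PySem.Dict.counter (tripleVals xs) := by
  simp only [tripleAltCounts, hr5, PySem.Dict.counter, PySem.Dict.modify, tripleVals,
    List.foldl_cons, List.foldl_nil]

-- scanning (k, count) pairs is find? on the keys
theorem scan_map (full : List Int) : ∀ (l : List Int),
    tripleAltScan (l.map (fun k => (k, (full.count k : Int)))) =
      (match l.find? (fun v => decide (3 ≤ (full.count v : Int))) with
        | some v => (true, v)
        | none => (false, 0))
  | [] => rfl
  | k :: l => by
    simp only [List.map_cons, tripleAltScan, List.find?]
    by_cases h : 3 ≤ (full.count k : Int)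
    · simp [h, ge_iff_le]
    · simp [h, ge_iff_le, scan_map full l]

-- find? commutes with Python-set dedup (first occurrences, in order)
theorem find_foldl_add {α : Type} [BEq α] [LawfulBEq α] (p : α → Bool) :
    ∀ (l s : List α), (List.foldl PySem.Set.add s l).find? p = (s.find? p).or (l.find? p)
  | [], s => by simp
  | x :: l, s => by
    simp only [List.foldl_cons, find_foldl_add p l]
    by_cases hc : PySem.Set.contains s x
    · simp only [PySem.Set.add, hc, if_true]
      rcases h : s.find? p with _ | y
      · have hx : x ∈ s := by simpa [PySem.Set.contains] using hc
        have := List.find?_eq_none.mp h x hx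
        simp [List.find?, this]
      · simp
    · rw [PySem.Set.add, if_neg hc, List.find?_append]
      rcases hp : p x <;> simp [List.find?, hp]

theorem find_ofList {α : Type} [BEq α] [LawfulBEq α] (p : α → Bool) (l : List α) :
    (PySem.Set.ofList l).find? p = l.find? p := by
  have := find_foldl_add p l PySem.Set.empty
  simpa [PySem.Set.ofList, PySem.Set.empty] using this

-- B = the first distinct value among the five whose count is ≥ 3
theorem alt_eq_find (xs : List Int) :
    triple_alt xs =
      (match (PySem.Set.ofList (tripleVals xs)).find? (tripleP xs) with
        | some v => (true, v)
        | none => (false, 0)) := by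
  have hp : (fun v => decide (3 ≤ ((tripleVals xs).count v : Int))) = tripleP xs := by
    funext v
    simp [tripleP, count_eq, ge_iff_le]
  rw [triple_alt, counts_eq, PySem.Dict.items_counter, scan_map, hp]

-- ===== VERDICT (by name: the statement is the Claim_ definition above) =====
theorem triple_spec : Claim_equal_triple := by
  intro xs _ _
  unfold Spec_triple
  rw [go_eq_find, alt_eq_find, find_ofList]
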